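-- pv_equiv track=rewrite | github.com/whisperH/GraphNet_Project | Prognostic/train/train_batch_ema.py | batch_sampler
-- ===== SOURCE A (Python) =====
-- def batch_sampler(data_info, data_nums, strategy, epoch, batch_size, instance_per_cid=4, split_num=500):
--     '''
--     cid_per_batch: 每个batch选取多少个cid
--     '''
--     sampler_lists = []
--     sampler_label_lists = []
--     cid_per_batch = batch_size // instance_per_cid
--
--     if strategy == "SequenceSampler":
--         num_iter = data_nums // batch_size + 1
--
--         for i in range(num_iter):
--             if i + 1 == num_iter:
--                 if i * batch_size < data_nums:
--                     sampler_lists.append([_ for _ in range(i * batch_size, data_nums)])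
--                     sampler_label_lists.append([_ for _ in range(i * batch_size, data_nums)])
--             else:
--                 sampler_lists.append([_ for _ in range(i * batch_size, (i + 1) * batch_size)])
--                 sampler_label_lists.append([_ for _ in range(i * batch_size, (i + 1) * batch_size)])
--     else:
--         raise "Unknown sampler strategy"
--
--     return sampler_lists, sampler_label_lists
-- ===== SOURCE B (Python) =====
-- def batch_sampler(data_info, data_nums, strategy, epoch, batch_size, instance_per_cid=4, split_num=500):
--     if strategy != "SequenceSampler":
--         raise "Unknown sampler strategy"
--     batches, cur = [], []
--     for idx in range(data_nums):
--         cur.append(idx)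
--         if len(cur) == batch_size:
--             batches.append(cur)
--             cur = []
--     if cur:
--         batches.append(cur)
--     return batches, [list(b) for b in batches]
-- ===== Notes on version B (the rewrite author's own statement) =====
-- stated objective: simpler
-- what changed: Replaces A's batch-count arithmetic (num_iter = data_nums//batch_size + 1 with a special-cased final/empty batch branch) by a single element-wise pass over range(data_nums) that grows a current batch and flushes it whenever it reaches batch_size, flushing the partial remainder at the end; no division and no final-batch case analysis.
-- outside the precondition, e.g. on batch_sampler([], -4, 'SequenceSampler', 0, -2, 4, 500): A returns ([[], []], [[], []]), B returns ([], [])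
import Mathlib
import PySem

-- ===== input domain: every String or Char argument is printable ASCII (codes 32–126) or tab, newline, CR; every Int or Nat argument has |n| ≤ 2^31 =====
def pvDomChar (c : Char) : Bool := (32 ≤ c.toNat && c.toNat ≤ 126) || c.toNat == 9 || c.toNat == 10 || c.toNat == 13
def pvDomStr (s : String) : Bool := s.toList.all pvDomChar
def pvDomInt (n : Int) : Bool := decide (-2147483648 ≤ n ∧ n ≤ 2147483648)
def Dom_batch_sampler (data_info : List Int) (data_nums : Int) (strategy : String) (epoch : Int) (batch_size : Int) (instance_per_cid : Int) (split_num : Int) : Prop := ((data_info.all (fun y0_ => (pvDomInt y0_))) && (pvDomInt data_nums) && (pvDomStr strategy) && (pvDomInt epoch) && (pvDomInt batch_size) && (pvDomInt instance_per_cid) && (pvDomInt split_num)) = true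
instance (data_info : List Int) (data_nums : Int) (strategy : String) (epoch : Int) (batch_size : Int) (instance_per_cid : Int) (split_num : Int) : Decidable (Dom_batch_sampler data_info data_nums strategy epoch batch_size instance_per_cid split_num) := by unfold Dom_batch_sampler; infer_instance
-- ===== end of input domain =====

-- B drops A's batch-count arithmetic (num_iter = data_nums//batch_size + 1 with a special-cased
-- final batch) for a single element-wise pass over range(data_nums) that grows a current batch
-- and flushes it at size batch_size; same return value on Pre_ (objective: simpler).

-- ===== PORT A =====
def batch_sampler (data_info : List Int) (data_nums : Int) (strategy : String) (epoch : Int) (batch_size : Int) (instance_per_cid : Int) (split_num : Int) : List (List Int) × List (List Int) :=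
  -- cid_per_batch = batch_size // instance_per_cid (unused; raises ZeroDivisionError iff instance_per_cid = 0, excluded by Pre_)
  let _cid_per_batch := PySem.Int.floordiv batch_size instance_per_cid
  if strategy == "SequenceSampler" then
    -- data_nums // batch_size raises ZeroDivisionError iff batch_size = 0, excluded by Pre_
    let num_iter := PySem.Int.floordiv data_nums batch_size + 1
    (PySem.List.pyRange 0 num_iter 1).foldl
      (fun (acc : List (List Int) × List (List Int)) i =>
        if i + 1 == num_iter then
          if i * batch_size < data_nums then
            (acc.1 ++ [PySem.List.pyRange (i * batch_size) data_nums 1],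
             acc.2 ++ [PySem.List.pyRange (i * batch_size) data_nums 1])
          else acc
        else
          (acc.1 ++ [PySem.List.pyRange (i * batch_size) ((i + 1) * batch_size) 1],
           acc.2 ++ [PySem.List.pyRange (i * batch_size) ((i + 1) * batch_size) 1]))
      ([], [])
  else ([], [])  -- Python: raise "Unknown sampler strategy" (excluded by Pre_)

-- ===== PORT B =====
-- the body of B's for-loop: grow the current batch, flush it when it reaches batch_size
def bodyB (batch_size : Int) (st : List (List Int) × List Int) (idx : Int) : List (List Int) × List Int :=
  let cur := st.2 ++ [idx]
  if ((cur.length : Int) == batch_size) then (st.1 ++ [cur], []) else (st.1, cur)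

def batch_sampler_alt (data_info : List Int) (data_nums : Int) (strategy : String) (epoch : Int) (batch_size : Int) (instance_per_cid : Int) (split_num : Int) : List (List Int) × List (List Int) :=
  if strategy != "SequenceSampler" then ([], [])  -- Python: raise (excluded by Pre_)
  else
    let st := (PySem.List.pyRange 0 data_nums 1).foldl (bodyB batch_size) ([], [])
    let batches := if st.2.isEmpty then st.1 else st.1 ++ [st.2]  -- 'if cur: batches.append(cur)'
    (batches, batches.map (fun b => b))

-- ===== PRECONDITION & SPEC =====
-- Pre_ excludes the inputs where A raises (strategy ≠ "SequenceSampler"; ZeroDivisionError on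
-- batch_size = 0 or instance_per_cid = 0) and the degenerate corner batch_size < 0 except where
-- both agree on ([], []): with a negative batch size both programs return meaningless values
-- (A a list of empty batches or nothing, B one unbounded batch) whose shapes are accidents of
-- each formulation — nobody would specify either.
def Pre_batch_sampler (data_info : List Int) (data_nums : Int) (strategy : String) (epoch : Int) (batch_size : Int) (instance_per_cid : Int) (split_num : Int) : Prop :=
  strategy = "SequenceSampler" ∧ batch_size ≠ 0 ∧ instance_per_cid ≠ 0 ∧
    (0 < batch_size ∨ (batch_size < data_nums ∧ data_nums ≤ 0))
instance (data_info : List Int) (data_nums : Int) (strategy : String) (epoch : Int) (batch_size : Int) (instance_per_cid : Int) (split_num : Int) : Decidable (Pre_batch_sampler data_info data_nums strategy epoch batch_size instance_per_cid split_num) := by unfold Pre_batch_sampler; infer_instance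

def pvWitness_batch_sampler : List Int × Int × String × Int × Int × Int × Int :=
  ([], 5, "SequenceSampler", 0, 2, 4, 500)

def Spec_batch_sampler (data_info : List Int) (data_nums : Int) (strategy : String) (epoch : Int) (batch_size : Int) (instance_per_cid : Int) (split_num : Int) (out : List (List Int) × List (List Int)) : Prop := out = batch_sampler_alt data_info data_nums strategy epoch batch_size instance_per_cid split_num
instance (data_info : List Int) (data_nums : Int) (strategy : String) (epoch : Int) (batch_size : Int) (instance_per_cid : Int) (split_num : Int) (out : List (List Int) × List (List Int)) : Decidable (Spec_batch_sampler data_info data_nums strategy epoch batch_size instance_per_cid split_num out) := by unfold Spec_batch_sampler; infer_instance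

-- ===== CLAIM (what is proved, stated in full; the proofs are below) =====
def Claim_equal_batch_sampler : Prop := ∀ (data_info : List Int) (data_nums : Int) (strategy : String) (epoch : Int) (batch_size : Int) (instance_per_cid : Int) (split_num : Int), Dom_batch_sampler data_info data_nums strategy epoch batch_size instance_per_cid split_num → Pre_batch_sampler data_info data_nums strategy epoch batch_size instance_per_cid split_num → Spec_batch_sampler data_info data_nums strategy epoch batch_size instance_per_cid split_num (batch_sampler data_info data_nums strategy epoch batch_size instance_per_cid split_num)
-- ===== LEMMAS AND PROOFS =====

-- the per-iteration chunk of A's loop body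
def gA (ni dn bs : Int) (i : Int) : List (List Int) :=
  if i + 1 = ni then (if i * bs < dn then [PySem.List.pyRange (i * bs) dn 1] else [])
  else [PySem.List.pyRange (i * bs) ((i + 1) * bs) 1]

-- A's fold appends the same chunks to both components
theorem foldA (ni dn bs : Int) (l : List Int) (acc : List (List Int) × List (List Int)) :
    l.foldl (fun (acc : List (List Int) × List (List Int)) i =>
        if i + 1 == ni then
          if i * bs < dn then
            (acc.1 ++ [PySem.List.pyRange (i * bs) dn 1], acc.2 ++ [PySem.List.pyRange (i * bs) dn 1])
          else acc
        else
          (acc.1 ++ [PySem.List.pyRange (i * bs) ((i + 1) * bs) 1],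
           acc.2 ++ [PySem.List.pyRange (i * bs) ((i + 1) * bs) 1])) acc
      = (acc.1 ++ l.flatMap (gA ni dn bs), acc.2 ++ l.flatMap (gA ni dn bs)) := by
  induction l generalizing acc with
  | nil => simp
  | cons x xs ih =>
    simp only [List.foldl_cons, List.flatMap_cons, ih, gA]
    by_cases h1 : x + 1 = ni
    · by_cases h2 : x * bs < dn <;> simp [h1, h2, List.append_assoc]
    · simp [h1, List.append_assoc]

-- the full batches among the first indices: chunk k is [k*b, (k+1)*b)
def chunks (b m : Nat) : List (List Int) :=
  (List.range m).map (fun k : Nat => PySem.List.pyRange ((k : Int) * (b : Int)) (((k : Int) + 1) * (b : Int)) 1)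

-- invariant of B's element-wise fold: after the first n indices the flushed batches are the
-- n / b full chunks and the current batch holds the trailing n % b indices
theorem foldB (b : Nat) (hb : 0 < b) (n : Nat) :
    (PySem.List.pyRange 0 (n : Int) 1).foldl (bodyB (b : Int)) ([], [])
      = (chunks b (n / b), PySem.List.pyRange (((n / b : Nat) : Int) * (b : Int)) (n : Int) 1) := by
  induction n with
  | zero => simp [chunks, PySem.List.pyRange_one_eq_nil (le_refl (0 : Int))]
  | succ n ih =>
    have hqr : n / b * b + n % b = n := Nat.div_add_mod' n b
    have hqr2 : b * (n / b) + n % b = n := Nat.div_add_mod n b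
    have hrb : n % b < b := Nat.mod_lt n hb
    have htI : ((n / b : Nat) : Int) * (b : Int) = ((n / b * b : Nat) : Int) := by push_cast; ring
    have hstep : PySem.List.pyRange 0 ((n + 1 : Nat) : Int) 1 = PySem.List.pyRange 0 (n : Int) 1 ++ [(n : Int)] := by
      have h1 : ((n + 1 : Nat) : Int) = (n : Int) + 1 := by push_cast; ring
      rw [h1, PySem.List.pyRange_one_succ_right (by positivity)]
    have hle : ((n / b : Nat) : Int) * (b : Int) ≤ (n : Int) := by
      rw [htI]; exact_mod_cast (show n / b * b ≤ n by omega)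
    have hcur : PySem.List.pyRange (((n / b : Nat) : Int) * (b : Int)) (n : Int) 1 ++ [(n : Int)]
        = PySem.List.pyRange (((n / b : Nat) : Int) * (b : Int)) ((n : Int) + 1) 1 :=
      (PySem.List.pyRange_one_succ_right hle).symm
    have hlen : (PySem.List.pyRange (((n / b : Nat) : Int) * (b : Int)) ((n : Int) + 1) 1).length = n % b + 1 := by
      rw [PySem.List.length_pyRange_one]
      have h2 : (n : Int) + 1 - ((n / b : Nat) : Int) * (b : Int) = ((n % b + 1 : Nat) : Int) := by
        rw [htI]; omega
      rw [h2, Int.toNat_natCast]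
    rw [hstep, List.foldl_append, ih, List.foldl_cons, List.foldl_nil, bodyB, hcur]
    simp only [hlen]
    by_cases hfull : n % b + 1 = b
    · have hdiv : (n + 1) / b = n / b + 1 := by
        have hnb : (n / b + 1) * b = n + 1 := by rw [add_mul, one_mul]; omega
        rw [← hnb, Nat.mul_div_cancel _ hb]
      have hend : (n : Int) + 1 = (((n / b : Nat) : Int) + 1) * (b : Int) := by
        rw [add_mul, one_mul, htI]; omega
      rw [if_pos (show ((↑(n % b + 1) : Int) == (b : Int)) = true from by
        simp only [beq_iff_eq]; exact_mod_cast hfull)]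
      rw [hdiv, Prod.mk.injEq]
      refine ⟨?_, ?_⟩
      · rw [chunks, chunks, List.range_succ, List.map_append, List.map_cons, List.map_nil, ← hend]
      · have h3 : ((n + 1 : Nat) : Int) ≤ ((n / b + 1 : Nat) : Int) * (b : Int) := by
          have h4 : ((n / b + 1 : Nat) : Int) * (b : Int) = (((n / b + 1) * b : Nat) : Int) := by
            push_cast; ring
          have hnb : (n / b + 1) * b = n + 1 := by rw [add_mul, one_mul]; omega
          rw [h4, hnb]
        exact (PySem.List.pyRange_one_eq_nil h3).symm
    · have hdiv : (n + 1) / b = n / b := by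
        rw [show n + 1 = n % b + 1 + b * (n / b) by omega, Nat.add_mul_div_left _ _ hb,
          Nat.div_eq_of_lt (by omega), Nat.zero_add]
      rw [if_neg (show ¬ (((↑(n % b + 1) : Int) == (b : Int)) = true) from by
        simp only [beq_iff_eq]
        intro h; exact hfull (by exact_mod_cast h))]
      rw [hdiv]
      have h5 : ((n + 1 : Nat) : Int) = (n : Int) + 1 := by push_cast; ring
      rw [h5]

-- A's flattened loop output for positive data_nums and batch_size, in the same chunked form
theorem flatA (b n : Nat) (hb : 0 < b) (hn : 0 < n) :
    (PySem.List.pyRange 0 (PySem.Int.floordiv (n : Int) (b : Int) + 1) 1).flatMap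
        (gA (PySem.Int.floordiv (n : Int) (b : Int) + 1) (n : Int) (b : Int))
      = chunks b (n / b)
        ++ (if ((n / b : Nat) : Int) * (b : Int) < (n : Int)
            then [PySem.List.pyRange (((n / b : Nat) : Int) * (b : Int)) (n : Int) 1] else []) := by
  have hqr : n / b * b + n % b = n := Nat.div_add_mod' n b
  have hrb : n % b < b := Nat.mod_lt n hb
  have htI : ((n / b : Nat) : Int) * (b : Int) = ((n / b * b : Nat) : Int) := by push_cast; ring
  have hq : PySem.Int.floordiv (n : Int) (b : Int) = ((n / b : Nat) : Int) := by
    refine (PySem.Int.floordiv_eq_iff_of_pos (by exact_mod_cast hb)).mpr ⟨?_, ?_⟩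
    · rw [htI]; exact_mod_cast (show n / b * b ≤ n by omega)
    · rw [add_mul, one_mul, htI]
      exact_mod_cast (show n < n / b * b + b by omega)
  rw [hq, PySem.List.pyRange_one_succ_right (by positivity), List.flatMap_append]
  congr 1
  · rw [List.flatMap_congr (g := fun i => [PySem.List.pyRange (i * (b : Int)) ((i + 1) * (b : Int)) 1])
      (fun i hi => by
        have hmem := PySem.List.mem_pyRange_one.mp hi
        have hne2 : ¬ (i + 1 = ((n / b : Nat) : Int) + 1) := by omega
        rw [gA, if_neg hne2])]
    rw [← List.map_eq_flatMap, PySem.List.pyRange_one, List.map_map, chunks]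
    have h6 : (((n / b : Nat) : Int) - 0).toNat = n / b := by rw [sub_zero, Int.toNat_natCast]
    rw [h6]
    apply List.map_congr_left
    intro k _
    simp
  · simp [gA]

-- shared core: for strategy "SequenceSampler" (and a non-degenerate sign combination) A = B
theorem batch_sampler_core (data_info : List Int) (data_nums : Int) (epoch : Int) (batch_size : Int) (instance_per_cid : Int) (split_num : Int)
    (hb : batch_size ≠ 0) (hbd : 0 < batch_size ∨ (batch_size < data_nums ∧ data_nums ≤ 0)) :
    batch_sampler data_info data_nums "SequenceSampler" epoch batch_size instance_per_cid split_num
      = batch_sampler_alt data_info data_nums "SequenceSampler" epoch batch_size instance_per_cid split_num := by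
  unfold batch_sampler batch_sampler_alt
  simp only [beq_self_eq_true, if_true, bne_self_eq_false, Bool.false_eq_true, if_false]
  rw [foldA]
  simp only [List.nil_append, List.map_id']
  by_cases hdn : data_nums ≤ 0
  · -- no indices: both sides are ([], [])
    have hBr : PySem.List.pyRange 0 data_nums 1 = [] := PySem.List.pyRange_one_eq_nil hdn
    have hq0 : PySem.Int.floordiv data_nums batch_size + 1 ≤ 1 := by
      rcases hbd with hpos | ⟨hlt, _⟩
      · have h7 := (PySem.Int.floordiv_eq_iff_of_pos (q := PySem.Int.floordiv data_nums batch_size) hpos).mp rfl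
        nlinarith [h7.1]
      · have h0 : PySem.Int.floordiv data_nums batch_size = 0 := by
          show Int.fdiv data_nums batch_size = 0
          rw [← Int.neg_fdiv_neg, Int.fdiv_eq_ediv_of_nonneg _ (by omega : (0 : Int) ≤ -batch_size)]
          exact Int.ediv_eq_zero_of_lt (by omega) (by omega)
        omega
    have hA : (PySem.List.pyRange 0 (PySem.Int.floordiv data_nums batch_size + 1) 1).flatMap
        (gA (PySem.Int.floordiv data_nums batch_size + 1) data_nums batch_size) = [] := by
      rcases eq_or_lt_of_le hq0 with heq | hlt
      · rw [heq]
        have h01 : PySem.List.pyRange (0 : Int) 1 1 = [0] := by decide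
        rw [h01]
        simp [gA]
        all_goals omega
      · rw [PySem.List.pyRange_one_eq_nil (by omega)]
        rfl
    rw [hA, hBr]
    simp
  · -- data_nums > 0 forces 0 < batch_size; move to Nat and use foldB / flatA
    replace hbd : 0 < batch_size := by omega
    obtain ⟨n, rfl⟩ : ∃ n : Nat, data_nums = (n : Int) := ⟨data_nums.toNat, (Int.toNat_of_nonneg (by omega)).symm⟩
    obtain ⟨b, rfl⟩ : ∃ c : Nat, batch_size = (c : Int) := ⟨batch_size.toNat, (Int.toNat_of_nonneg (by omega)).symm⟩
    have hb' : 0 < b := by exact_mod_cast hbd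
    have hn' : 0 < n := by omega
    have hqr : n / b * b + n % b = n := Nat.div_add_mod' n b
    have hrb : n % b < b := Nat.mod_lt n hb'
    have htI : ((n / b : Nat) : Int) * (b : Int) = ((n / b * b : Nat) : Int) := by push_cast; ring
    rw [flatA b n hb' hn', foldB b hb' n, htI]
    by_cases hr0 : n % b = 0
    · have hEq : ((n / b * b : Nat) : Int) = (n : Int) := by exact_mod_cast (show n / b * b = n by omega)
      rw [hEq, if_neg (lt_irrefl _), PySem.List.pyRange_one_eq_nil (le_refl (n : Int))]
      simp
    · have hlt : ((n / b * b : Nat) : Int) < (n : Int) := by exact_mod_cast (show n / b * b < n by omega)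
      have hie : (PySem.List.pyRange ((n / b * b : Nat) : Int) (n : Int) 1).isEmpty = false := by
        rw [PySem.List.pyRange_one_cons hlt]; rfl
      rw [if_pos hlt, hie]
      simp

-- ===== VERDICT (by name: the statement is the Claim_ definition above) =====
theorem batch_sampler_spec : Claim_equal_batch_sampler := by
  intro data_info data_nums strategy epoch batch_size instance_per_cid split_num _hdom hpre
  obtain ⟨hs, hb, _hi, hbd⟩ := hpre
  subst hs
  exact batch_sampler_core data_info data_nums epoch batch_size instance_per_cid split_num hb hbd
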